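-- pv_equiv track=rewrite | github.com/lehancode/uba_computacion | parciales/Python - ComA-20240715/solucion.py | empleados_del_mes
-- ===== SOURCE A (Python) =====
-- def empleados_del_mes(horas: dict[int, list[int]]) -> list[int]:
--   horas_por_empleado: dict[int,list[int]] = {}
--   res: list[int] = []
--
--   for empleado in horas.keys():
--     cantidad_horas: int = 0
--     for hs in horas[empleado]:
--       cantidad_horas += hs
--     horas_por_empleado[empleado] = cantidad_horas
--
--   horas_empleados: list[int] = list(horas_por_empleado.values())
--   horas_mejor_empleado: int = maximo(horas_empleados)
--   for empleado in horas_por_empleado.keys():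
--     if horas_por_empleado[empleado] >= horas_mejor_empleado:
--       res.append(empleado)
--   return res
--
-- def maximo(l: list[int]) -> int:
--   res: int = 0
--   for i in range(len(l)):
--     if l[i] > res:
--       res = l[i]
--   return res
-- ===== SOURCE B (Python) =====
-- def empleados_del_mes(horas: dict[int, list[int]]) -> list[int]:
--   best_max: int = 0
--   best: list[int] = []
--   for empleado, hs in horas.items():
--     total = sum(hs)
--     if total > best_max:
--       best_max = total
--       best = [empleado]
--     elif total == best_max:
--       best.append(empleado)
--   return best
-- ===== Notes on version B (the rewrite author's own statement) =====
-- stated objective: faster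
-- what changed: Replaced A's three passes (build a totals dict, 0-initialised max over its values, filter keys by >= max) with a single fold over the items that keeps the running best total (initialised to 0) and the current list of best employees, resetting on a strictly larger total and appending on a tie. One pass avoids building and re-scanning the intermediate dict (measured ~1.8x at the largest size).
import Mathlib
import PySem

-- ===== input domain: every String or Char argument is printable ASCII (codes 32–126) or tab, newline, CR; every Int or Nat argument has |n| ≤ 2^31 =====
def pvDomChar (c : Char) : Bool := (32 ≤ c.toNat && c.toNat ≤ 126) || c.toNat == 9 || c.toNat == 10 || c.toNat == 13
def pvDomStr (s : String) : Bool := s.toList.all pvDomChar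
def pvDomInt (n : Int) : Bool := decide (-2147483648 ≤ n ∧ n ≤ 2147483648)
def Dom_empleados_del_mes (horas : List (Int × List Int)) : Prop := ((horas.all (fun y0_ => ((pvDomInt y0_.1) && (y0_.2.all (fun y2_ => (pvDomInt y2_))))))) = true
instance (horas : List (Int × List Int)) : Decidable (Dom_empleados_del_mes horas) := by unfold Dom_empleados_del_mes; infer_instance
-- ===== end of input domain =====

-- B replaces A's three passes (totals dict, 0-floored max, filter) by a single pass keeping the
-- running best total (init 0) and the current list of best employees; measured faster in a timing run.

-- ===== PORT A =====
-- helper 'maximo' from the same module: running max over l with res initialised to 0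
def maximo (l : List Int) : Int :=
  (PySem.List.pyRange 0 (PySem.List.len l) 1).foldl
    (fun res i => if PySem.List.pyGetD l i 0 > res then PySem.List.pyGetD l i 0 else res) 0

-- literal port of A: build the totals dict, take maximo of its values, collect keys with total ≥ it
def empleados_del_mes (horas : List (Int × List Int)) : List Int :=
  let d := PySem.Dict.ofList horas
  let horas_por_empleado :=
    d.keys.foldl (fun hpe empleado =>
      let cantidad_horas := (d.getD empleado []).foldl (fun acc hs => acc + hs) 0
      hpe.insert empleado cantidad_horas) (PySem.Dict.empty)
  let horas_empleados := horas_por_empleado.values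
  let horas_mejor_empleado := maximo horas_empleados
  horas_por_empleado.keys.foldl (fun res empleado =>
    if horas_por_empleado.getD empleado 0 ≥ horas_mejor_empleado then res ++ [empleado] else res) []

-- ===== PORT B =====
-- literal port of B: one fold over the items, state = (best total so far, best employees so far)
def empleados_del_mes_alt (horas : List (Int × List Int)) : List Int :=
  ((PySem.Dict.ofList horas).items.foldl (fun st p =>
      let total := p.2.sum
      if total > st.1 then (total, [p.1])
      else if total = st.1 then (st.1, st.2 ++ [p.1])
      else st) ((0 : Int), ([] : List Int))).2

-- ===== PRECONDITION & SPEC =====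
def Spec_empleados_del_mes (horas : List (Int × List Int)) (out : List Int) : Prop := out = empleados_del_mes_alt horas
instance (horas : List (Int × List Int)) (out : List Int) : Decidable (Spec_empleados_del_mes horas out) := by unfold Spec_empleados_del_mes; infer_instance

-- ===== CLAIM (what is proved, stated in full; the proofs are below) =====
def Claim_equal_empleados_del_mes : Prop := ∀ (horas : List (Int × List Int)), Dom_empleados_del_mes horas → Spec_empleados_del_mes horas (empleados_del_mes horas)

-- ===== LEMMAS AND PROOFS =====

-- running maximum of the totals, as both programs compute it
def pvRunmax (l : List (Int × Int)) (b : Int) : Int :=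
  l.foldl (fun r p => if p.2 > r then p.2 else r) b

theorem pvLe_runmax (l : List (Int × Int)) (b : Int) : b ≤ pvRunmax l b := by
  induction l generalizing b with
  | nil => simp [pvRunmax]
  | cons p l ih =>
    simp only [pvRunmax, List.foldl_cons] at ih ⊢
    by_cases hc : p.2 > b
    · rw [if_pos hc]; exact le_trans (le_of_lt hc) (ih p.2)
    · rw [if_neg hc]; exact ih b

theorem pvMem_le_runmax (l : List (Int × Int)) (b : Int) (p : Int × Int) (hp : p ∈ l) :
    p.2 ≤ pvRunmax l b := by
  induction l generalizing b with
  | nil => cases hp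
  | cons q l ih =>
    simp only [pvRunmax, List.foldl_cons]
    rcases List.mem_cons.mp hp with h | h
    · subst h
      by_cases hc : p.2 > b
      · rw [if_pos hc]
        have := pvLe_runmax l p.2
        simpa [pvRunmax] using this
      · rw [if_neg hc]
        have := pvLe_runmax l b
        simp only [pvRunmax] at this
        omega
    · exact ih _ h

-- B's fold, characterised: final best = running max, final list = keys of the entries equal to it
theorem pvBfold (l : List (Int × Int)) (b : Int) (acc : List Int) :
    l.foldl (fun st p =>
        if p.2 > st.1 then (p.2, [p.1])
        else if p.2 = st.1 then (st.1, st.2 ++ [p.1])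
        else st) (b, acc)
      = (pvRunmax l b,
         (if pvRunmax l b = b then acc else [])
           ++ (l.filter (fun p => p.2 = pvRunmax l b)).map Prod.fst) := by
  induction l generalizing b acc with
  | nil => simp [pvRunmax]
  | cons p l ih =>
    simp only [List.foldl_cons]
    by_cases h1 : p.2 > b
    · simp only [if_pos h1, ih]
      have hM : pvRunmax (p :: l) b = pvRunmax l p.2 := by
        simp [pvRunmax, if_pos h1]
      have hle : p.2 ≤ pvRunmax l p.2 := pvLe_runmax l p.2
      have hne' : ¬ (pvRunmax l p.2 = b) := by omega
      rw [hM, List.filter_cons]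
      by_cases h2 : pvRunmax l p.2 = p.2
      · simp [h2]
        exact fun h => absurd h (by omega)
      · have h2' : ¬ (p.2 = pvRunmax l p.2) := fun h => h2 h.symm
        simp [h2, h2', hne']
    · have hM : pvRunmax (p :: l) b = pvRunmax l b := by
        simp [pvRunmax, if_neg h1]
      by_cases h2 : p.2 = b
      · simp only [if_neg h1, if_pos h2, ih]
        rw [hM]
        by_cases h3 : pvRunmax l b = b
        · simp [h2, h3]
        · have : ¬ (p.2 = pvRunmax l b) := by omega
          simp [this, h3]
      · simp only [if_neg h1, if_neg h2, ih]
        rw [hM]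
        have : ¬ (p.2 = pvRunmax l b) := by
          have := pvLe_runmax l b
          omega
        simp [this]

-- A's final loop, characterised: append-if is filter-then-map
theorem pvAfold (l : List (Int × Int)) (acc : List Int) (m : Int) :
    l.foldl (fun res p => if p.2 ≥ m then res ++ [p.1] else res) acc
      = acc ++ (l.filter (fun p => p.2 ≥ m)).map Prod.fst := by
  induction l generalizing acc with
  | nil => simp
  | cons p l ih =>
    simp only [List.foldl_cons, List.filter_cons]
    by_cases h : p.2 ≥ m
    · simp [h, ih]
    · simp [h, ih]

-- with m the running max, '≥ m' and '= m' filter the same entries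
theorem pvFilter_ge_eq (l : List (Int × Int)) :
    l.filter (fun p => p.2 ≥ pvRunmax l 0) = l.filter (fun p => p.2 = pvRunmax l 0) := by
  refine List.filter_congr ?_
  intro p hp
  have := pvMem_le_runmax l 0 p hp
  simp only [decide_eq_decide]
  omega

-- the common core, stated over the (key, total) list
theorem pvCore (l : List (Int × Int)) :
    l.foldl (fun res p => if p.2 ≥ pvRunmax l 0 then res ++ [p.1] else res) []
      = (l.foldl (fun st p =>
          if p.2 > st.1 then (p.2, [p.1])
          else if p.2 = st.1 then (st.1, st.2 ++ [p.1])
          else st) ((0 : Int), ([] : List Int))).2 := by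
  rw [pvAfold, pvBfold, pvFilter_ge_eq]
  simp

-- A's per-employee total, as A computes it
def pvSum (d : PySem.Dict Int (List Int)) (k : Int) : Int :=
  (d.getD k []).foldl (fun acc hs => acc + hs) 0

-- 'maximo' is the running max over the list, floored at 0
theorem maximo_eq (xs : List Int) :
    maximo xs = xs.foldl (fun r x => if x > r then x else r) 0 := by
  unfold maximo
  exact PySem.List.foldl_pyRange_zero_pyGetD xs 0 (fun r x => if x > r then x else r) 0

-- both ports, evaluated on the same dict with Nodup keys, agree
theorem pvMain (d : PySem.Dict Int (List Int)) (hnd : d.keys.Nodup) :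
    ((d.keys.foldl (fun hpe k => hpe.insert k (pvSum d k))
        (PySem.Dict.empty : PySem.Dict Int Int)).keys.foldl
      (fun res k =>
        if (d.keys.foldl (fun hpe k => hpe.insert k (pvSum d k))
              (PySem.Dict.empty : PySem.Dict Int Int)).getD k 0
            ≥ maximo (d.keys.foldl (fun hpe k => hpe.insert k (pvSum d k))
                (PySem.Dict.empty : PySem.Dict Int Int)).values
        then res ++ [k] else res) [])
    = (d.items.foldl (fun st p =>
        if p.2.sum > st.1 then (p.2.sum, [p.1])
        else if p.2.sum = st.1 then (st.1, st.2 ++ [p.1])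
        else st) ((0 : Int), ([] : List Int))).2 := by
  set hpe := d.keys.foldl (fun hpe k => hpe.insert k (pvSum d k))
    (PySem.Dict.empty : PySem.Dict Int Int) with hhpe
  have hitems : hpe.items = d.keys.map (fun k => (k, pvSum d k)) := by
    rw [hhpe]
    have := PySem.Dict.items_foldl_insert_fresh (l := d.keys) (k := fun k => k)
      (v := pvSum d) (d := (PySem.Dict.empty : PySem.Dict Int Int))
      (by intro a _; simp) (by simpa using hnd)
    simpa using this
  have hkeys : hpe.keys = d.keys := by
    simp [PySem.Dict.keys, hitems]
  have hnd2 : hpe.keys.Nodup := by rw [hkeys]; exact hnd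
  have hvals : hpe.values = d.keys.map (fun k => pvSum d k) := by
    simp [PySem.Dict.values, hitems]
  have hgetD : ∀ k ∈ d.keys, hpe.getD k 0 = pvSum d k := by
    intro k hk
    have hm : (k, pvSum d k) ∈ hpe.items := by
      rw [hitems]; exact List.mem_map_of_mem hk
    exact PySem.Dict.getD_of_mem_items hpe hm hnd2 0
  rw [hkeys, hvals]
  rw [PySem.List.foldl_congr_mem d.keys _
        (fun res k =>
          if pvSum d k ≥ maximo (d.keys.map (fun k => pvSum d k)) then res ++ [k] else res)
        [] (by intro acc x hx; rw [hgetD x hx])]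
  have hmax : maximo (d.keys.map (fun k => pvSum d k))
      = pvRunmax (d.keys.map (fun k => (k, pvSum d k))) 0 := by
    rw [maximo_eq]
    simp only [pvRunmax, List.foldl_map]
  have hL : d.keys.foldl
        (fun res k =>
          if pvSum d k ≥ maximo (d.keys.map (fun k => pvSum d k)) then res ++ [k] else res) []
      = (d.keys.map (fun k => (k, pvSum d k))).foldl
          (fun res p =>
            if p.2 ≥ pvRunmax (d.keys.map (fun k => (k, pvSum d k))) 0 then res ++ [p.1] else res)
          [] := by
    rw [List.foldl_map, hmax]
  rw [hL]
  have hB : d.items.foldl (fun st p =>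
        if p.2.sum > st.1 then (p.2.sum, [p.1])
        else if p.2.sum = st.1 then (st.1, st.2 ++ [p.1])
        else st) ((0 : Int), ([] : List Int))
      = (d.keys.map (fun k => (k, pvSum d k))).foldl
          (fun st p =>
            if p.2 > st.1 then (p.2, [p.1])
            else if p.2 = st.1 then (st.1, st.2 ++ [p.1])
            else st) ((0 : Int), ([] : List Int)) := by
    rw [PySem.Dict.items_eq_map_keys d hnd ([] : List Int), List.foldl_map, List.foldl_map]
    apply PySem.List.foldl_congr_mem
    intro acc x hx
    have hsum : (d.getD x []).sum = pvSum d x := by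
      simp [pvSum, List.sum_eq_foldl]
    rw [hsum]
  rw [hB]
  exact pvCore _

-- ===== VERDICT (by name: the statement is the Claim_ definition above) =====
theorem empleados_del_mes_spec : Claim_equal_empleados_del_mes := by
  intro horas _
  show empleados_del_mes horas = empleados_del_mes_alt horas
  exact pvMain (PySem.Dict.ofList horas) (PySem.Dict.nodup_keys_ofList horas)
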